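-- pv_equiv track=rewrite | github.com/NeilVibe/LocalizationTools | tests/fixtures/stringid/true_e2e_kr_similar.py | categorize_entries
-- ===== SOURCE A (Python) =====
-- from typing import List, Dict, Tuple
--
-- def categorize_entries(entries: List[Dict]) -> Dict[str, List[Dict]]:
--     """Categorize entries by type."""
--     categories = {
--         "plain_text": [],
--         "multiline": [],
--         "pacolor": [],
--         "textbind": [],
--         "long_text": [],
--     }
--
--     for entry in entries:
--         src = entry["source"]
--
--         if "<PAColor" in src:
--             categories["pacolor"].append(entry)
--         elif "TextBind" in src:
--             categories["textbind"].append(entry)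
--         elif '\n' in src or '\\n' in src:
--             categories["multiline"].append(entry)
--         elif len(src) > 100:
--             categories["long_text"].append(entry)
--         else:
--             categories["plain_text"].append(entry)
--
--     return categories
-- ===== SOURCE B (Python) =====
-- def categorize_entries(entries):
--     """Categorize entries by type."""
--     def classify(entry):
--         src = entry["source"]
--         if "<PAColor" in src:
--             return "pacolor"
--         if "TextBind" in src:
--             return "textbind"
--         if '\n' in src or '\\n' in src:
--             return "multiline"
--         if len(src) > 100:
--             return "long_text"
--         return "plain_text"
--
--     names = ["plain_text", "multiline", "pacolor", "textbind", "long_text"]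
--     return {name: [e for e in entries if classify(e) == name] for name in names}
-- ===== Notes on version B (the rewrite author's own statement) =====
-- stated objective: alternative
-- what changed: Replaces the single loop that appends into a mutable five-bucket dict with a pure classify function plus five filter passes (one comprehension per category), building the result dict in one expression.
import Mathlib
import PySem

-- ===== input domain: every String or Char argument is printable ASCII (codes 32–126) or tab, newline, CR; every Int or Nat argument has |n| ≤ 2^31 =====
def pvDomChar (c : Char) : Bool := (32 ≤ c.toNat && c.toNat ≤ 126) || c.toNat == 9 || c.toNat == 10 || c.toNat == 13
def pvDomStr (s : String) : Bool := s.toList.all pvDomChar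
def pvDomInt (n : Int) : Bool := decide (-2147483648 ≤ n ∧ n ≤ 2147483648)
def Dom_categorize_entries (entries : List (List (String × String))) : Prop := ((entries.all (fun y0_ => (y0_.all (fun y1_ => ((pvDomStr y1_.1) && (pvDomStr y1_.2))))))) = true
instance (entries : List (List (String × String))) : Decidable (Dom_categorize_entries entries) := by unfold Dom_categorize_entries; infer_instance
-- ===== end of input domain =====

-- B replaces A's single loop appending into a mutable five-bucket dict by a pure classify
-- function and five independent filter passes (one per category); return value only.

-- ===== PORT A =====
-- entry["source"]: Pre_ guarantees the key exists, so the getD "" default is never used inside Pre_.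
def pvSrc (entry : List (String × String)) : String :=
  ((PySem.Dict.mk entry).get? "source").getD ""

def pvStepA (cats : PySem.Dict String (List (List (String × String))))
    (entry : List (String × String)) : PySem.Dict String (List (List (String × String))) :=
  let src := pvSrc entry
  if PySem.Str.isIn "<PAColor" src then cats.modify "pacolor" [] (· ++ [entry])
  else if PySem.Str.isIn "TextBind" src then cats.modify "textbind" [] (· ++ [entry])
  else if PySem.Str.isIn "\n" src || PySem.Str.isIn "\\n" src then cats.modify "multiline" [] (· ++ [entry])
  else if 100 < PySem.Str.len src then cats.modify "long_text" [] (· ++ [entry])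
  else cats.modify "plain_text" [] (· ++ [entry])

def categorize_entries (entries : List (List (String × String))) : List (String × List (List (String × String))) :=
  let categories : PySem.Dict String (List (List (String × String))) :=
    PySem.Dict.mk [("plain_text", []), ("multiline", []), ("pacolor", []), ("textbind", []), ("long_text", [])]
  (entries.foldl pvStepA categories).items

-- ===== PORT B =====
def pvClassify (entry : List (String × String)) : String :=
  let src := pvSrc entry
  if PySem.Str.isIn "<PAColor" src then "pacolor"
  else if PySem.Str.isIn "TextBind" src then "textbind"
  else if PySem.Str.isIn "\n" src || PySem.Str.isIn "\\n" src then "multiline"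
  else if 100 < PySem.Str.len src then "long_text"
  else "plain_text"

def categorize_entries_alt (entries : List (List (String × String))) : List (String × List (List (String × String))) :=
  ["plain_text", "multiline", "pacolor", "textbind", "long_text"].map
    (fun name => (name, entries.filter (fun e => pvClassify e == name)))

-- ===== PRECONDITION & SPEC =====
-- Pre_ excludes entries missing the "source" key, on which Python A raises KeyError.
def Pre_categorize_entries (entries : List (List (String × String))) : Prop :=
  (entries.all (fun e => (PySem.Dict.mk e).contains "source")) = true
instance (entries : List (List (String × String))) : Decidable (Pre_categorize_entries entries) := by unfold Pre_categorize_entries; infer_instance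

def pvWitness_categorize_entries : (List (List (String × String))) := ([[("source", "hello")], [("source", "a\nb")]])

def Spec_categorize_entries (entries : List (List (String × String))) (out : List (String × List (List (String × String)))) : Prop := out = categorize_entries_alt entries
instance (entries : List (List (String × String))) (out : List (String × List (List (String × String)))) : Decidable (Spec_categorize_entries entries out) := by unfold Spec_categorize_entries; infer_instance

-- ===== CLAIM (what is proved, stated in full; the proofs are below) =====
def Claim_equal_categorize_entries : Prop := ∀ (entries : List (List (String × String))), Dom_categorize_entries entries → Pre_categorize_entries entries → Spec_categorize_entries entries (categorize_entries entries)

-- ===== LEMMAS AND PROOFS =====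

-- Invariant of A's fold: each bucket accumulates the entries it classifies.
theorem pvFold_items (entries : List (List (String × String)))
    (p m pa t l : List (List (String × String))) :
    (entries.foldl pvStepA (PySem.Dict.mk
        [("plain_text", p), ("multiline", m), ("pacolor", pa), ("textbind", t), ("long_text", l)])).items
    = [("plain_text", p ++ entries.filter (fun e => pvClassify e == "plain_text")),
       ("multiline", m ++ entries.filter (fun e => pvClassify e == "multiline")),
       ("pacolor", pa ++ entries.filter (fun e => pvClassify e == "pacolor")),
       ("textbind", t ++ entries.filter (fun e => pvClassify e == "textbind")),
       ("long_text", l ++ entries.filter (fun e => pvClassify e == "long_text"))] := by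
  induction entries generalizing p m pa t l with
  | nil => simp
  | cons e rest ih =>
    simp only [List.foldl_cons, List.filter_cons]
    by_cases h1 : PySem.Str.isIn "<PAColor" (pvSrc e) = true
    · simp at h1
      have hs : pvStepA (PySem.Dict.mk [("plain_text", p), ("multiline", m), ("pacolor", pa), ("textbind", t), ("long_text", l)]) e = PySem.Dict.mk [("plain_text", p), ("multiline", m), ("pacolor", pa ++ [e]), ("textbind", t), ("long_text", l)] := by
        simp [pvStepA, h1, PySem.Dict.modify, PySem.Dict.contains, PySem.Dict.getD, PySem.Dict.get?, PySem.Dict.insert]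
      have hc : pvClassify e = "pacolor" := by simp [pvClassify, h1]
      rw [hs, ih]
      simp [hc]
    · by_cases h2 : PySem.Str.isIn "TextBind" (pvSrc e) = true
      · simp at h1 h2
        have hs : pvStepA (PySem.Dict.mk [("plain_text", p), ("multiline", m), ("pacolor", pa), ("textbind", t), ("long_text", l)]) e = PySem.Dict.mk [("plain_text", p), ("multiline", m), ("pacolor", pa), ("textbind", t ++ [e]), ("long_text", l)] := by
          simp [pvStepA, h1, h2, PySem.Dict.modify, PySem.Dict.contains, PySem.Dict.getD, PySem.Dict.get?, PySem.Dict.insert]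
        have hc : pvClassify e = "textbind" := by simp [pvClassify, h1, h2]
        rw [hs, ih]
        simp [hc]
      · by_cases h3 : (PySem.Str.isIn "\n" (pvSrc e) || PySem.Str.isIn "\\n" (pvSrc e)) = true
        · simp at h1 h2 h3
          have hs : pvStepA (PySem.Dict.mk [("plain_text", p), ("multiline", m), ("pacolor", pa), ("textbind", t), ("long_text", l)]) e = PySem.Dict.mk [("plain_text", p), ("multiline", m ++ [e]), ("pacolor", pa), ("textbind", t), ("long_text", l)] := by
            simp [pvStepA, h1, h2, h3, PySem.Dict.modify, PySem.Dict.contains, PySem.Dict.getD, PySem.Dict.get?, PySem.Dict.insert]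
          have hc : pvClassify e = "multiline" := by simp [pvClassify, h1, h2, h3]
          rw [hs, ih]
          simp [hc]
        · by_cases h4 : (100 : Int) < PySem.Str.len (pvSrc e)
          · simp at h1 h2 h3 h4
            have hs : pvStepA (PySem.Dict.mk [("plain_text", p), ("multiline", m), ("pacolor", pa), ("textbind", t), ("long_text", l)]) e = PySem.Dict.mk [("plain_text", p), ("multiline", m), ("pacolor", pa), ("textbind", t), ("long_text", l ++ [e])] := by
              simp [pvStepA, h1, h2, h3, h4, PySem.Dict.modify, PySem.Dict.contains, PySem.Dict.getD, PySem.Dict.get?, PySem.Dict.insert]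
            have hc : pvClassify e = "long_text" := by simp [pvClassify, h1, h2, h3, h4]
            rw [hs, ih]
            simp [hc]
          · simp at h1 h2 h3 h4
            have hs : pvStepA (PySem.Dict.mk [("plain_text", p), ("multiline", m), ("pacolor", pa), ("textbind", t), ("long_text", l)]) e = PySem.Dict.mk [("plain_text", p ++ [e]), ("multiline", m), ("pacolor", pa), ("textbind", t), ("long_text", l)] := by
              simp [pvStepA, h1, h2, h3, h4, PySem.Dict.modify, PySem.Dict.contains, PySem.Dict.getD, PySem.Dict.get?, PySem.Dict.insert]
            have hc : pvClassify e = "plain_text" := by simp [pvClassify, h1, h2, h3, h4]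
            rw [hs, ih]
            simp [hc]

-- ===== VERDICT (by name: the statement is the Claim_ definition above) =====
theorem categorize_entries_spec : Claim_equal_categorize_entries := by
  intro entries _ _
  unfold Spec_categorize_entries categorize_entries categorize_entries_alt
  simpa using pvFold_items entries [] [] [] [] []
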